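-- pv_equiv track=rewrite | github.com/keshav-gupta19/Python-programs | Q2.py | creditcard
-- ===== SOURCE A (Python) =====
-- def creditcard(a):
--     c=""
--     for i in range(0,len(a)):
--         if i>=len(a)-4:
--             c+=a[i]
--         else:
--             c+='*'
--     return c
-- ===== SOURCE B (Python) =====
-- def creditcard(a):
--     return '*' * (len(a) - 4) + a[-4:]
-- ===== Notes on version B (the rewrite author's own statement) =====
-- stated objective: faster
-- what changed: Replaced the per-character index loop with one closed-form expression: a mask of len(a)-4 asterisks built by string repetition, concatenated with the last-four-characters slice; short inputs are covered because negative repetition and the slice clamp naturally.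
import Mathlib
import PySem

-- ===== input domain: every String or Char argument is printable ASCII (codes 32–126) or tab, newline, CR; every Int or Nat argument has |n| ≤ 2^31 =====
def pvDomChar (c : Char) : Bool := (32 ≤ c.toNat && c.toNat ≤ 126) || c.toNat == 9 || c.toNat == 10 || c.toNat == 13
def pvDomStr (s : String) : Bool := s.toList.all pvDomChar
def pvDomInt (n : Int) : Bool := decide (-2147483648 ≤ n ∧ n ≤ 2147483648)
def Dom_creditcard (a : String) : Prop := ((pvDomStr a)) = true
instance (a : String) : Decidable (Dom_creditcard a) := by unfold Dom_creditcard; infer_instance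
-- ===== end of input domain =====

-- B replaces A's per-character index loop by one closed-form expression:
-- a block of len(a)-4 asterisks followed by the last-4-characters slice (objective: simpler).

-- ===== PORT A =====
-- builds c character by character over range(0, len(a))
def creditcard (a : String) : String :=
  String.ofList <|
    (PySem.List.pyRange 0 (a.toList.length : Int) 1).foldl
      (fun c i =>
        if i ≥ (a.toList.length : Int) - 4 then c ++ [PySem.List.pyGetD a.toList i ' ']
        else c ++ ['*'])
      []

-- ===== PORT B =====
-- '*' * (len(a) - 4) + a[-4:]
def creditcard_alt (a : String) : String :=
  String.ofList (PySem.List.pyRepeat ['*'] ((a.toList.length : Int) - 4) ++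
                 PySem.List.slice a.toList (some (-4)) none)

-- ===== PRECONDITION & SPEC =====
def Spec_creditcard (a : String) (out : String) : Prop := out = creditcard_alt a
instance (a : String) (out : String) : Decidable (Spec_creditcard a out) := by unfold Spec_creditcard; infer_instance

-- ===== CLAIM (what is proved, stated in full; the proofs are below) =====
def Claim_equal_creditcard : Prop := ∀ (a : String), Dom_creditcard a → Spec_creditcard a (creditcard a)

-- ===== LEMMAS AND PROOFS =====

-- the loop body of A's port, over the character list
def ccStep (xs : List Char) (c : List Char) (i : Int) : List Char :=
  if i ≥ (xs.length : Int) - 4 then c ++ [PySem.List.pyGetD xs i ' '] else c ++ ['*']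

-- indices ≥ len-4 copy the character: the fold over such a tail appends drop (len-4)
theorem ccStep_tail (xs : List Char) (init : List Char) (h : 4 ≤ xs.length) :
    (PySem.List.pyRange ((xs.length : Int) - 4) (xs.length : Int) 1).foldl (ccStep xs) init
    = init ++ xs.drop (xs.length - 4) := by
  have hcongr := PySem.List.foldl_congr_mem
    (l := PySem.List.pyRange ((xs.length : Int) - 4) (xs.length : Int) 1)
    (init := init)
    (f := ccStep xs)
    (g := fun (c : List Char) (i : Int) => c ++ [PySem.List.pyGetD xs i ' '])
    (by
      intro acc x hx
      have := (PySem.List.mem_pyRange_one).1 hx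
      have hge : x ≥ (xs.length : Int) - 4 := by omega
      simp [ccStep, hge])
  rw [hcongr,
      PySem.List.foldl_pyRange_pyGetD' xs ' '
        (fun (c : List Char) (ch : Char) => c ++ [ch]) init (by omega),
      PySem.List.foldl_append_singleton_eq_self]
  congr 2
  omega

-- indices < len-4 take the '*' branch: the fold over the head produces the mask
theorem ccStep_head (xs : List Char) (h : 4 ≤ xs.length) :
    (PySem.List.pyRange 0 ((xs.length : Int) - 4) 1).foldl (ccStep xs) []
    = List.replicate ((xs.length : Int) - 4).toNat '*' := by
  have hcongr := PySem.List.foldl_congr_mem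
    (l := PySem.List.pyRange 0 ((xs.length : Int) - 4) 1)
    (init := ([] : List Char))
    (f := ccStep xs)
    (g := fun (c : List Char) (_ : Int) => c ++ ['*'])
    (by
      intro acc x hx
      have := (PySem.List.mem_pyRange_one).1 hx
      have hlt : ¬ x ≥ (xs.length : Int) - 4 := by omega
      simp [ccStep, hlt])
  rw [hcongr, PySem.List.foldl_append_singleton_eq_map, List.map_const',
      PySem.List.length_pyRange_one, List.nil_append]
  congr 1
  omega

-- the whole loop, in closed form
theorem creditcard_list (xs : List Char) :
    (PySem.List.pyRange 0 (xs.length : Int) 1).foldl (ccStep xs) []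
    = List.replicate ((xs.length : Int) - 4).toNat '*' ++ xs.drop (xs.length - 4) := by
  by_cases h : 4 ≤ xs.length
  · rw [PySem.List.pyRange_one_append 0 ((xs.length : Int) - 4) (xs.length : Int)
          (by omega) (by omega),
        List.foldl_append, ccStep_head xs h, ccStep_tail xs _ h]
  · -- len < 4: every index copies its character; the mask is empty
    have hmask : ((xs.length : Int) - 4).toNat = 0 := by omega
    have hdrop : xs.length - 4 = 0 := by omega
    rw [hmask, hdrop, List.replicate_zero, List.drop_zero, List.nil_append]
    have hcongr := PySem.List.foldl_congr_mem
      (l := PySem.List.pyRange 0 (xs.length : Int) 1)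
      (init := ([] : List Char))
      (f := ccStep xs)
      (g := fun (c : List Char) (i : Int) => c ++ [PySem.List.pyGetD xs i ' '])
      (by
        intro acc x hx
        have := (PySem.List.mem_pyRange_one).1 hx
        have hge : x ≥ (xs.length : Int) - 4 := by omega
        simp [ccStep, hge])
    rw [hcongr,
        PySem.List.foldl_pyRange_zero_pyGetD' xs ' '
          (fun (c : List Char) (ch : Char) => c ++ [ch]) [],
        PySem.List.foldl_append_singleton_eq_self, List.nil_append]

-- ===== VERDICT (by name: the statement is the Claim_ definition above) =====
theorem creditcard_spec : Claim_equal_creditcard := by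
  intro a _
  unfold Spec_creditcard creditcard creditcard_alt
  rw [show (fun c i =>
        if i ≥ (a.toList.length : Int) - 4 then c ++ [PySem.List.pyGetD a.toList i ' ']
        else c ++ ['*']) = ccStep a.toList from rfl,
      creditcard_list,
      PySem.List.pyRepeat_singleton,
      PySem.List.slice_from_neg_ofNat a.toList 4 (by norm_num)]
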